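/- GENERATED by mk_final_copies.py from the proof of the farm's unit `run_ctors` (farm:run_ctors.1: Lemmas.lean) as the
   re-elaboration sweep compiled it — do not edit. -/
/-
  Pure facts for the unit `run_ctors`: the shadow after `registerMem` depends only on the shadow before; the descriptor table stays
  in memory under stack stores; the constants of this image's runtime record as the walker's literals.
-/
import Asan.CheckWalk
import Vorbis.Spec.Units.run_ctors

open X86 X86.User Asan Vorbis

namespace Vorbis.Spec.run_ctors

/-- Two memories that agree on a range still agree on it after the same byte store into both. -/
theorem eqOn_write {lo hi : Nat} {m m' : Mem} (h : Mem.EqOn lo hi m m') (b : Word) (v : Byte) :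
    Mem.EqOn lo hi (m.write b v) (m'.write b v) := by
  intro a ha hb
  by_cases e : b = a
  · subst e
    rw [Mem.read_write_same, Mem.read_write_same]
  · rw [Mem.read_write_other _ _ _ _ e, Mem.read_write_other _ _ _ _ e]
    exact h a ha hb

/-- … after the same run of shadow stores (`fillMem`) into both. -/
theorem eqOn_fillMem {lo hi : Nat} {m m' : Mem} (h : Mem.EqOn lo hi m m') (g : Nat) (v : Byte) (k : Nat) :
    Mem.EqOn lo hi (fillMem m g v k) (fillMem m' g v k) := by
  induction k generalizing m m' g with
  | zero => exact h
  | succ k ih =>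
    simp only [fillMem]
    exact ih (eqOn_write h _ _) (g + 1)

/-- … after the registration of one global in both. -/
theorem eqOn_registerOne {lo hi : Nat} {m m' : Mem} (h : Mem.EqOn lo hi m m') (d : GlobalDesc) :
    Mem.EqOn lo hi (registerOne m d) (registerOne m' d) := by
  unfold registerOne
  apply eqOn_fillMem
  by_cases e : (d.beg + d.size) % 8 = 0
  · rw [if_pos e, if_pos e]
    exact h
  · rw [if_neg e, if_neg e]
    exact eqOn_write h _ _

/-- **`registerMem` depends on the range only through the range**: two memories that agree on a range (the shadow) agree on it
after the registration of the same descriptors. -/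
theorem eqOn_registerMem {lo hi : Nat} {m m' : Mem} (h : Mem.EqOn lo hi m m') (ds : List GlobalDesc) :
    Mem.EqOn lo hi (registerMem m ds) (registerMem m' ds) := by
  induction ds generalizing m m' with
  | nil => exact h
  | cons d ds ih =>
    have e1 : registerMem m (d :: ds) = registerMem (registerOne m d) ds := rfl
    have e2 : registerMem m' (d :: ds) = registerMem (registerOne m' d) ds := rfl
    rw [e1, e2]
    exact ih (eqOn_registerOne h d)


/-- **The descriptor table stays in memory** under stores that leave a range `[lo, hi)` around the table alone. -/
theorem descsIn_eqOn {lo hi : Nat} {m m' : Mem} {table : Nat} {descs : List GlobalDesc} (h : Mem.EqOn lo hi m m')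
    (hlo : lo ≤ table) (hhi : table + 64 * descs.length ≤ hi) (hmax : hi < 2 ^ 63) (hd : DescsIn m table descs) :
    DescsIn m' table descs := by
  intro i hi'
  obtain ⟨h1, h2, h3⟩ := hd i hi'
  have e1 : (UInt64.ofNat (table + 64 * i)).toNat = table + 64 * i := by
    rw [UInt64.toNat_ofNat']
    omega
  have e2 : (UInt64.ofNat (table + 64 * i + 8)).toNat = table + 64 * i + 8 := by
    rw [UInt64.toNat_ofNat']
    omega
  have e3 : (UInt64.ofNat (table + 64 * i + 16)).toNat = table + 64 * i + 16 := by
    rw [UInt64.toNat_ofNat']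
    omega
  refine ⟨?_, ?_, ?_⟩
  · rw [h.readLE _ 8 (by omega) (by omega) (by omega)]
    exact h1
  · rw [h.readLE _ 8 (by omega) (by omega) (by omega)]
    exact h2
  · rw [h.readLE _ 8 (by omega) (by omega) (by omega)]
    exact h3


/-- `__init_array_start` of this image, in the form the walker gives `ebx` after `mov ebx, 0x121500`. -/
theorem initStart : UInt64.ofNat rt.sym.initArrayStart = Word.ofBV 1185024#32 := by decide

/-- The constructor of the runtime record is the label `_sub_I_65535_1`. -/
theorem ctorEntry : rt.sym.ctor = Vorbis.L._sub_I_65535_1.entry := by decide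

/-- The descriptor table of this image lies in the image's data, below the stack region. -/
theorem table_bounds : 0x100000 ≤ rt.table ∧ rt.table + 64 * rt.descs.length ≤ 0x700000 := by decide

/-- The windows of the constructor's contract, evaluated: the shadow of the six slots of this image's globals. -/
theorem ctor_writes (u : State) : (ctorSpec rt).writes u =
    [⟨12731072, 12731080⟩, ⟨12730560, 12730568⟩, ⟨12730568, 12730576⟩, ⟨12730576, 12730708⟩, ⟨12730712, 12730720⟩,
      ⟨12731264, 12731396⟩] := id rfl

/-- The windows of `run_ctors`' own contract, evaluated: the same six. -/
theorem runCtors_writes (u : State) : (runCtorsSpec rt).writes u =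
    [⟨12731072, 12731080⟩, ⟨12730560, 12730568⟩, ⟨12730568, 12730576⟩, ⟨12730576, 12730708⟩, ⟨12730712, 12730720⟩,
      ⟨12731264, 12731396⟩] := id rfl

end Vorbis.Spec.run_ctors
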